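-- pv_equiv track=rewrite | github.com/stevenotts2012-rgb/looparchitect-backend-api | app/services/final_plan_resolver.py | _find_section_decision
-- ===== SOURCE A (Python) =====
-- from typing import Any, Dict, List, Optional
--
-- def _find_section_decision(
--
--     section_name: str,
--     section_index: int,
--     section_decisions: List[dict],
-- ) -> Optional[dict]:
--     """Return the Decision Engine SectionDecision dict for *section_name*."""
--     name_lower = section_name.strip().lower()
--     # Try exact match first
--     for d in section_decisions:
--         if str(d.get("section_name") or "").strip().lower() == name_lower:
--             return d
--     # Try type prefix match (e.g. "hook_1" → "hook", "verse_2" → "verse")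
--     section_type_prefix = name_lower.split("_")[0] if "_" in name_lower else name_lower
--     for d in section_decisions:
--         decision_name = str(d.get("section_name") or "").strip().lower()
--         if decision_name.startswith(section_type_prefix):
--             return d
--     return None
-- ===== SOURCE B (Python) =====
-- from typing import List, Optional
--
--
-- def _find_section_decision(
--     section_name: str,
--     section_index: int,
--     section_decisions: List[dict],
-- ) -> Optional[dict]:
--     """Score each candidate (0 = exact, 1 = prefix) and keep the lexicographic
--     minimum of (score, position); exact matches therefore beat any prefix match,
--     and ties go to the earliest candidate, exactly the intended priority."""
--     name_lower = section_name.strip().lower()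
--     prefix = name_lower.split("_")[0]
--     best = None  # ((score, position), decision)
--     for idx, d in enumerate(section_decisions):
--         n = str(d.get("section_name") or "").strip().lower()
--         if n == name_lower:
--             score = 0
--         elif n.startswith(prefix):
--             score = 1
--         else:
--             continue
--         if best is None or (score, idx) < best[0]:
--             best = ((score, idx), d)
--     return best[1] if best is not None else None
-- ===== Notes on version B (the rewrite author's own statement) =====
-- stated objective: alternative
-- what changed: A does two staged scans (exact pass, then prefix pass); B scores every candidate once (0 = exact, 1 = prefix) over an enumeration and selects the lexicographic minimum of (score, position), which encodes the same priority order.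
import Mathlib
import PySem

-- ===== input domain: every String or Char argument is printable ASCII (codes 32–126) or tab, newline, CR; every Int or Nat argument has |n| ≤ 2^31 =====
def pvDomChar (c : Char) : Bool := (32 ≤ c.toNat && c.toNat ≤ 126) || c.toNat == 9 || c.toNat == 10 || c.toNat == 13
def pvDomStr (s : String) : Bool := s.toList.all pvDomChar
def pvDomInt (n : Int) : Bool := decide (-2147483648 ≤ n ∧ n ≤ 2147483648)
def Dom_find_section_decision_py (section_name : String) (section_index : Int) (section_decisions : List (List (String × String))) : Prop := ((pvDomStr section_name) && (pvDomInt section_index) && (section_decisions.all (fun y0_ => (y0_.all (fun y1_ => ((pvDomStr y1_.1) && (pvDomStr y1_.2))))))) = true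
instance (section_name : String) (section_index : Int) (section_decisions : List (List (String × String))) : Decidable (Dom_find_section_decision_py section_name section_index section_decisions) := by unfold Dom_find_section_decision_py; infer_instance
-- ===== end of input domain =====

-- B replaces A's two staged scans by one scoring pass (0 = exact, 1 = prefix) that keeps the lexicographic minimum of (score, position) (objective: alternative).


-- ===== PORT A =====
-- str(d.get("section_name") or "").strip().lower(): first-match lookup; a missing key and "" both normalize via getD "".
def fsdNorm (d : List (String × String)) : String :=
  PySem.Str.lower (PySem.Str.strip ((d.lookup "section_name").getD ""))

-- A's first loop: first exact match.
def fsdExact (nl : String) : List (List (String × String)) → Option (List (String × String))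
  | [] => none
  | d :: t => if fsdNorm d == nl then some d else fsdExact nl t

-- A's second loop: first prefix match.
def fsdPrefix (pfx : String) : List (List (String × String)) → Option (List (String × String))
  | [] => none
  | d :: t => if PySem.Str.startswith (fsdNorm d) pfx then some d else fsdPrefix pfx t

def find_section_decision_py (section_name : String) (section_index : Int) (section_decisions : List (List (String × String))) : Option (List (String × String)) :=
  let name_lower := PySem.Str.lower (PySem.Str.strip section_name)
  match fsdExact name_lower section_decisions with
  | some d => some d
  | none =>
    -- name_lower.split("_")[0] if "_" in name_lower else name_lower
    let pfx := if PySem.Str.isIn "_" name_lower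
               then ((PySem.Str.split? name_lower "_").getD []).headD ""
               else name_lower
    match fsdPrefix pfx section_decisions with
    | some d => some d
    | none => none

-- ===== PORT B =====
-- score 0 = exact, 1 = prefix, none = skipped (the 'continue' branch).
def fsdScore (nl pfx n : String) : Option Nat :=
  if n == nl then some 0
  else if PySem.Str.startswith n pfx then some 1
  else none

-- the loop body: keep the ((score, position), d) with lexicographically least key.
-- Python tuple '<' is lexicographic; ported explicitly as s < score ∨ (s = score ∧ idx < pos).
def fsdStep (nl pfx : String) (best : Option ((Nat × Int) × List (String × String)))
    (p : Int × List (String × String)) : Option ((Nat × Int) × List (String × String)) :=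
  match fsdScore nl pfx (fsdNorm p.2) with
  | none => best
  | some s =>
    match best with
    | none => some ((s, p.1), p.2)
    | some b => if s < b.1.1 || (s == b.1.1 && p.1 < b.1.2) then some ((s, p.1), p.2) else best

def find_section_decision_py_alt (section_name : String) (section_index : Int) (section_decisions : List (List (String × String))) : Option (List (String × String)) :=
  let name_lower := PySem.Str.lower (PySem.Str.strip section_name)
  -- name_lower.split("_")[0]
  let pfx := ((PySem.Str.split? name_lower "_").getD []).headD ""
  (((PySem.List.enumerate section_decisions).foldl (fsdStep name_lower pfx) none).map (·.2))

-- ===== PRECONDITION & SPEC =====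
def Spec_find_section_decision_py (section_name : String) (section_index : Int) (section_decisions : List (List (String × String))) (out : Option (List (String × String))) : Prop := out = find_section_decision_py_alt section_name section_index section_decisions
instance (section_name : String) (section_index : Int) (section_decisions : List (List (String × String))) (out : Option (List (String × String))) : Decidable (Spec_find_section_decision_py section_name section_index section_decisions out) := by unfold Spec_find_section_decision_py; infer_instance

-- ===== CLAIM (what is proved, stated in full; the proofs are below) =====
def Claim_equal_find_section_decision_py : Prop := ∀ (section_name : String) (section_index : Int) (section_decisions : List (List (String × String))), Dom_find_section_decision_py section_name section_index section_decisions → Spec_find_section_decision_py section_name section_index section_decisions (find_section_decision_py section_name section_index section_decisions)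

-- ===== LEMMAS AND PROOFS =====

-- The scoring fold from start index k, with an accumulator whose position is < k and whose
-- score is 0 or 1, projects to: the accumulator's payload if it has score 0; else the first
-- exact match; else the accumulator's payload (score 1); else the first prefix match.
lemma fsdFold_char (nl pfx : String) (l : List (List (String × String))) :
    ∀ (k : Int) (b : Option ((Nat × Int) × List (String × String))),
      (∀ s i x, b = some ((s, i), x) → i < k ∧ s ≤ 1) →
      (((PySem.List.enumerate l k).foldl (fsdStep nl pfx) b).map (·.2)) =
      (match b with
       | some ((0, _), x) => some x
       | _ =>
         match fsdExact nl l with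
         | some d => some d
         | none =>
           match b with
           | some (_, x) => some x
           | none => fsdPrefix pfx l) := by
  induction l with
  | nil =>
    intro k b _
    simp only [PySem.List.enumerate_nil, List.foldl_nil, fsdExact, fsdPrefix]
    rcases b with _ | ⟨⟨⟨s, i⟩, x⟩⟩
    · rfl
    · cases s <;> rfl
  | cons d t ih =>
    intro k b hb
    rw [PySem.List.enumerate_cons, List.foldl_cons]
    by_cases hex : fsdNorm d == nl
    · have hs : fsdScore nl pfx (fsdNorm d) = some 0 := by simp [fsdScore, hex]
      rcases b with _ | ⟨⟨⟨s, i⟩, x⟩⟩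
      · have hstep : fsdStep nl pfx none (k, d) = some ((0, k), d) := by
          simp [fsdStep, hs]
        rw [hstep, ih (k + 1) (some ((0, k), d))
          (by rintro s i x h; simp only [Option.some.injEq, Prod.mk.injEq] at h; omega)]
        simp [fsdExact, hex]
      · obtain ⟨hik, hs1⟩ := hb s i x rfl
        interval_cases s
        · have hstep : fsdStep nl pfx (some ((0, i), x)) (k, d) = some ((0, i), x) := by
            simp [fsdStep, hs, show ¬ (k < i) by omega]
          rw [hstep, ih (k + 1) (some ((0, i), x))
            (by rintro s' i' x' h; simp only [Option.some.injEq, Prod.mk.injEq] at h; omega)]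
        · have hstep : fsdStep nl pfx (some ((1, i), x)) (k, d) = some ((0, k), d) := by
            simp [fsdStep, hs]
          rw [hstep, ih (k + 1) (some ((0, k), d))
            (by rintro s' i' x' h; simp only [Option.some.injEq, Prod.mk.injEq] at h; omega)]
          simp [fsdExact, hex]
    · have hexb : (fsdNorm d == nl) = false := Bool.eq_false_iff.mpr hex
      by_cases hpf : PySem.Str.startswith (fsdNorm d) pfx
      · have hs : fsdScore nl pfx (fsdNorm d) = some 1 := by
          simp [fsdScore, hexb]
          simpa using hpf
        rcases b with _ | ⟨⟨⟨s, i⟩, x⟩⟩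
        · have hstep : fsdStep nl pfx none (k, d) = some ((1, k), d) := by
            simp [fsdStep, hs]
          rw [hstep, ih (k + 1) (some ((1, k), d))
            (by rintro s' i' x' h; simp only [Option.some.injEq, Prod.mk.injEq] at h; omega)]
          simp only [fsdExact, fsdPrefix, hexb, Bool.false_eq_true, if_false, hpf, if_true]
        · obtain ⟨hik, hs1⟩ := hb s i x rfl
          interval_cases s
          · have hstep : fsdStep nl pfx (some ((0, i), x)) (k, d) = some ((0, i), x) := by
              simp [fsdStep, hs]
            rw [hstep, ih (k + 1) (some ((0, i), x))
              (by rintro s' i' x' h; simp only [Option.some.injEq, Prod.mk.injEq] at h; omega)]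
          · have hstep : fsdStep nl pfx (some ((1, i), x)) (k, d) = some ((1, i), x) := by
              simp [fsdStep, hs, show ¬ (k < i) by omega]
            rw [hstep, ih (k + 1) (some ((1, i), x))
              (by rintro s' i' x' h; simp only [Option.some.injEq, Prod.mk.injEq] at h; omega)]
            simp only [fsdExact, hexb, Bool.false_eq_true, if_false]
      · have hpfb : PySem.Str.startswith (fsdNorm d) pfx = false := Bool.eq_false_iff.mpr hpf
        have hs : fsdScore nl pfx (fsdNorm d) = none := by
          simp [fsdScore, hexb]
          simpa using hpfb
        have hstep : fsdStep nl pfx b (k, d) = b := by simp [fsdStep, hs]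
        rw [hstep, ih (k + 1) b
          (fun s i x h => ⟨by have := (hb s i x h).1; omega, (hb s i x h).2⟩)]
        rcases b with _ | ⟨⟨⟨s, i⟩, x⟩⟩
        · simp only [fsdExact, fsdPrefix, hexb, Bool.false_eq_true, if_false, hpfb]
        · obtain ⟨hik, hs1⟩ := hb s i x rfl
          interval_cases s
          · rfl
          · simp only [fsdExact, hexb, Bool.false_eq_true, if_false]

-- splitOn.go never meets the separator: it accumulates the whole rest into the current piece.
lemma fsdGo_no_sep (sep : List Char) :
    ∀ (fuel : Nat) (l cur : List Char) (acc : List (List Char)),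
      (∀ j, ¬ sep <+: l.drop j) → l.length < fuel →
      PySem.Chars.splitOn.go sep fuel l cur acc = ((cur.reverse ++ l) :: acc).reverse := by
  intro fuel
  induction fuel with
  | zero => intro l cur acc _ h; omega
  | succ n ih =>
    intro l cur acc hnp hlen
    cases l with
    | nil => simp [PySem.Chars.splitOn.go]
    | cons c rest =>
      have h0 : ¬ sep <+: (c :: rest) := by simpa using hnp 0
      have hpre : sep.isPrefixOf (c :: rest) = false := by
        rw [Bool.eq_false_iff]
        intro hc
        exact h0 (List.isPrefixOf_iff_prefix.mp hc)
      rw [PySem.Chars.splitOn.go]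
      simp only [hpre, Bool.false_eq_true, if_false]
      rw [ih rest (c :: cur) acc (fun j => by simpa using hnp (j + 1))
        (by simpa using Nat.lt_of_succ_lt_succ hlen)]
      simp

-- If "_" does not occur in nl, nl.split("_")[0] is nl itself, so A's conditional prefix
-- equals B's unconditional split(…)[0].
lemma fsdPrefix_eq (nl : String) :
    (if PySem.Str.isIn "_" nl
     then ((PySem.Str.split? nl "_").getD []).headD ""
     else nl) = ((PySem.Str.split? nl "_").getD []).headD "" := by
  by_cases h : PySem.Str.isIn "_" nl = true
  · rw [if_pos h]
  · rw [if_neg h]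
    have h' : PySem.Chars.isIn ['_'] nl.toList = false := by simpa using h
    have hno : ∀ j, ¬ (['_'] <+: nl.toList.drop j) := by
      intro j hj
      have hin := (PySem.Chars.exists_prefix_drop_iff_isIn _ _).mp ⟨j, hj⟩
      rw [hin] at h'
      cases h'
    have hsplit : PySem.Chars.splitOn nl.toList ['_'] = [nl.toList] := by
      unfold PySem.Chars.splitOn
      rw [fsdGo_no_sep ['_'] _ _ _ _ hno (by omega)]
      simp
    simp only [PySem.Str.split?, PySem.Chars.split?]
    rw [if_neg (by decide)]
    simp [show ("_" : String).toList = ['_'] from rfl, hsplit, String.ofList_toList]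

-- ===== VERDICT (by name: the statement is the Claim_ definition above) =====
theorem find_section_decision_py_spec : Claim_equal_find_section_decision_py := by
  intro sn si sds _
  unfold Spec_find_section_decision_py
  simp only [find_section_decision_py, find_section_decision_py_alt]
  rw [fsdPrefix_eq]
  rw [fsdFold_char _ _ sds 0 none (by intro s i x h; simp at h)]
  cases fsdExact (PySem.Str.lower (PySem.Str.strip sn)) sds <;>
    simp <;> cases fsdPrefix _ sds <;> simp
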